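-- pv_equiv track=rewrite | github.com/Manitary/advent-of-code | 2016/python/07.py | isSSL
-- ===== SOURCE A (Python) =====
-- def isABA(s, i):
--     return s[i] == s[i + 2] != s[i + 1] and s[i : i + 3].isalpha()
--
-- def isSSL(s):
--     outside = set()
--     inside = set()
--     brackets = 0
--     for i in range(len(s) - 2):
--         if s[i] == "[":
--             brackets += 1
--         elif s[i] == "]":
--             brackets -= 1
--         else:
--             if isABA(s, i):
--                 aba = s[i : i + 3]
--                 bab = aba[1] + aba[0] + aba[1]
--                 if brackets:
--                     if bab in outside:
--                         return True
--                     inside.add(aba)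
--                 else:
--                     if bab in inside:
--                         return True
--                     outside.add(aba)
--     return False
-- ===== SOURCE B (Python) =====
-- def isSSL(s):
--     # Pass 1: prefix bracket-balance table bal[i] = balance of s[:i].
--     bal = [0]
--     for c in s:
--         bal.append(bal[-1] + (c == "[") - (c == "]"))
--     # Pass 2: classify every ABA triple by the balance at its position.
--     inside = set()
--     outside = set()
--     for i in range(len(s) - 2):
--         a, b, c = s[i], s[i + 1], s[i + 2]
--         if a == c != b and (a + b + c).isalpha():
--             (inside if bal[i] else outside).add(a + b + c)
--     # An SSL address has some ABA outside whose BAB occurs inside.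
--     return any(t[1] + t[0] + t[1] in inside for t in outside)
-- ===== Notes on version B (the rewrite author's own statement) =====
-- stated objective: alternative
-- what changed: Replaces the single early-returning pass that threads a live bracket counter with a precomputed prefix-balance table, a pure classification pass over triples (no bracket branches, no early return), and a final existence check over the collected sets.
import Mathlib
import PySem

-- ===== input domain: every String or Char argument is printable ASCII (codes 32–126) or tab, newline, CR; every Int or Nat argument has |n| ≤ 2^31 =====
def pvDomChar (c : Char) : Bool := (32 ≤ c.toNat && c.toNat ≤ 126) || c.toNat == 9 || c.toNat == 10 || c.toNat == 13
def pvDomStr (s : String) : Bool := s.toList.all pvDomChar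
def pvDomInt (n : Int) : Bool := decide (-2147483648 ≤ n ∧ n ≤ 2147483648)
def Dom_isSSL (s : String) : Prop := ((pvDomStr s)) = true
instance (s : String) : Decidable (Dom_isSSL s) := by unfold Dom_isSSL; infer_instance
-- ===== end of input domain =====

-- B replaces A's single early-returning pass carrying a live bracket counter by a prefix-balance
-- table, a pure classification pass, and a final existence check (alternative decomposition).


-- ===== PORT A =====
-- helper isABA(s, i); A only calls it with 0 ≤ i and i+2 < len(s), where pyGetD is exact
def isABA (l : List Char) (i : Int) : Bool :=
  ((PySem.List.pyGetD l i ' ' == PySem.List.pyGetD l (i + 2) ' ')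
    && !(PySem.List.pyGetD l (i + 2) ' ' == PySem.List.pyGetD l (i + 1) ' '))
    && PySem.Chars.strIsalpha (PySem.List.slice l (some i) (some (i + 3)))

-- A's for-loop with early return, state (outside, inside, brackets)
def isSSL_loopA (l : List Char) :
    List Int → PySem.Set (List Char) → PySem.Set (List Char) → Int → Bool
  | [], _, _, _ => false
  | i :: rest, outside, inside, brackets =>
    if PySem.List.pyGetD l i ' ' == '[' then
      isSSL_loopA l rest outside inside (brackets + 1)
    else if PySem.List.pyGetD l i ' ' == ']' then
      isSSL_loopA l rest outside inside (brackets - 1)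
    else if isABA l i then
      let aba := PySem.List.slice l (some i) (some (i + 3))
      let bab := [PySem.List.pyGetD aba 1 ' ', PySem.List.pyGetD aba 0 ' ',
                  PySem.List.pyGetD aba 1 ' ']
      if brackets ≠ 0 then
        if PySem.Set.contains outside bab then true
        else isSSL_loopA l rest outside (PySem.Set.add inside aba) brackets
      else
        if PySem.Set.contains inside bab then true
        else isSSL_loopA l rest (PySem.Set.add outside aba) inside brackets
    else isSSL_loopA l rest outside inside brackets

def isSSL (s : String) : Bool :=
  isSSL_loopA s.toList (PySem.List.pyRange 0 (PySem.Str.len s - 2) 1)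
    PySem.Set.empty PySem.Set.empty 0

-- ===== PORT B =====
-- pass 1 of Source B: bal = [0]; for c in s: bal.append(bal[-1] + (c=='[') - (c==']'))
def isSSL_balAux (d : Int) : List Char → List Int
  | [] => []
  | c :: cs =>
    let d' := d + (if c == '[' then 1 else 0) - (if c == ']' then 1 else 0)
    d' :: isSSL_balAux d' cs

def isSSL_bal (l : List Char) : List Int := 0 :: isSSL_balAux 0 l

-- pass 2 of Source B: classify each ABA triple by the precomputed balance at its position
def isSSL_collect (l : List Char) (bal : List Int) :
    List Int → PySem.Set (List Char) → PySem.Set (List Char) →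
      PySem.Set (List Char) × PySem.Set (List Char)
  | [], inside, outside => (inside, outside)
  | i :: rest, inside, outside =>
    let a := PySem.List.pyGetD l i ' '
    let b := PySem.List.pyGetD l (i + 1) ' '
    let c := PySem.List.pyGetD l (i + 2) ' '
    if ((a == c) && !(c == b)) && PySem.Chars.strIsalpha [a, b, c] then
      if PySem.List.pyGetD bal i 0 ≠ 0 then
        isSSL_collect l bal rest (PySem.Set.add inside [a, b, c]) outside
      else
        isSSL_collect l bal rest inside (PySem.Set.add outside [a, b, c])
    else isSSL_collect l bal rest inside outside

def isSSL_alt (s : String) : Bool :=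
  let l := s.toList
  let p := isSSL_collect l (isSSL_bal l) (PySem.List.pyRange 0 (PySem.Str.len s - 2) 1)
    PySem.Set.empty PySem.Set.empty
  p.2.any (fun t => PySem.Set.contains p.1
    [PySem.List.pyGetD t 1 ' ', PySem.List.pyGetD t 0 ' ', PySem.List.pyGetD t 1 ' '])

-- ===== PRECONDITION & SPEC =====
def Spec_isSSL (s : String) (out : Bool) : Prop := out = isSSL_alt s
instance (s : String) (out : Bool) : Decidable (Spec_isSSL s out) := by unfold Spec_isSSL; infer_instance

-- ===== CLAIM (what is proved, stated in full; the proofs are below) =====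
def Claim_equal_isSSL : Prop := ∀ (s : String), Dom_isSSL s → Spec_isSSL s (isSSL s)

-- ===== LEMMAS AND PROOFS =====

-- the BAB of a 3-char ABA, as both ports build it
def babOf (t : List Char) : List Char :=
  [PySem.List.pyGetD t 1 ' ', PySem.List.pyGetD t 0 ' ', PySem.List.pyGetD t 1 ' ']

-- B's final existence check
def crossB (out ins : PySem.Set (List Char)) : Bool :=
  out.any (fun t => PySem.Set.contains ins (babOf t))

-- proof intermediate between A's loop and B's two passes: collect, carrying the depth
def collectD (l : List Char) :
    List Int → PySem.Set (List Char) → PySem.Set (List Char) → Int →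
      PySem.Set (List Char) × PySem.Set (List Char)
  | [], out, ins, _ => (out, ins)
  | i :: rest, out, ins, br =>
    if PySem.List.pyGetD l i ' ' == '[' then collectD l rest out ins (br + 1)
    else if PySem.List.pyGetD l i ' ' == ']' then collectD l rest out ins (br - 1)
    else if isABA l i then
      if br ≠ 0 then
        collectD l rest out (PySem.Set.add ins (PySem.List.slice l (some i) (some (i + 3)))) br
      else collectD l rest (PySem.Set.add out (PySem.List.slice l (some i) (some (i + 3)))) ins br
    else collectD l rest out ins br

-- bracket balance of a prefix, as a fold
def pureBal (l : List Char) : Int :=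
  l.foldl (fun d c => d + (if c == '[' then 1 else 0) - (if c == ']' then 1 else 0)) 0

theorem babOf_pair (x y : Char) : babOf [x, y, x] = [y, x, y] := by
  simp [babOf, PySem.List.pyGetD, PySem.List.pyGet?, PySem.List.pyIdx?]

theorem take_three {l : List Char} {k : Nat} (h : k + 3 ≤ l.length) :
    (l.drop k).take 3 = [l[k], l[k + 1], l[k + 2]] := by
  rw [List.drop_eq_getElem_cons (l := l) (by omega : k < l.length), List.take_succ_cons,
    List.drop_eq_getElem_cons (l := l) (by omega : k + 1 < l.length), List.take_succ_cons,
    List.drop_eq_getElem_cons (l := l) (by omega : k + 2 < l.length), List.take_succ_cons]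
  simp only [List.take_zero]
  rfl

theorem slice_triple {l : List Char} {i : Int} (h0 : 0 ≤ i) (h3 : i + 3 ≤ (l.length : Int)) :
    PySem.List.slice l (some i) (some (i + 3)) =
      [l[i.toNat], l[i.toNat + 1], l[i.toNat + 2]] := by
  rw [PySem.List.slice_toNat l h0 (by omega)]
  have h : (i + 3).toNat - i.toNat = 3 := by omega
  rw [h, take_three (by omega)]
  rfl

theorem aba_shape {l : List Char} {i : Int} (h0 : 0 ≤ i) (h3 : i + 3 ≤ (l.length : Int))
    (h : isABA l i = true) :
    PySem.List.slice l (some i) (some (i + 3)) = [l[i.toNat], l[i.toNat + 1], l[i.toNat]] := by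
  have hs := slice_triple h0 h3
  simp only [isABA, Bool.and_eq_true, beq_iff_eq] at h
  have he := h.1.1
  rw [PySem.List.pyGetD_eq_getElem l ' ' h0 (by omega),
    PySem.List.pyGetD_eq_getElem l ' ' (show (0:Int) ≤ i + 2 by omega) (by omega)] at he
  have he3 : l[i.toNat] = l[i.toNat + 2] := by
    rw [he]; congr 1; omega
  rw [hs, ← he3]

-- membership is preserved by collectD
theorem mem_collectD (l t : List Char) :
    ∀ (idxs : List Int) (out ins : PySem.Set (List Char)) (br : Int),
      (t ∈ out → t ∈ (collectD l idxs out ins br).1) ∧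
      (t ∈ ins → t ∈ (collectD l idxs out ins br).2) := by
  intro idxs
  induction idxs with
  | nil => intro out ins br; exact ⟨id, id⟩
  | cons i rest ih =>
    intro out ins br
    simp only [collectD]
    split_ifs with h1 h2 h3 h4
    · exact ih out ins (br + 1)
    · exact ih out ins (br - 1)
    · exact ⟨fun h => (ih _ _ _).1 h,
        fun h => (ih _ _ _).2 ((PySem.Set.mem_add _ _ _).mpr (Or.inl h))⟩
    · exact ⟨fun h => (ih _ _ _).1 ((PySem.Set.mem_add _ _ _).mpr (Or.inl h)),
        fun h => (ih _ _ _).2 h⟩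
    · exact ih out ins br

theorem crossB_true {out ins : PySem.Set (List Char)} {t : List Char}
    (ho : t ∈ out) (hi : babOf t ∈ ins) : crossB out ins = true := by
  simp only [crossB, List.any_eq_true]
  exact ⟨t, ho, (PySem.Set.contains_iff _ _).mpr hi⟩

theorem crossB_false {out ins : PySem.Set (List Char)}
    (h : ∀ t ∈ out, babOf t ∉ ins) : crossB out ins = false := by
  simp only [crossB, List.any_eq_false]
  intro t ht
  simpa [PySem.Set.contains_iff] using h t ht

-- L1: A's early-return loop equals B's final check over the fully collected sets
theorem loopA_eq_cross (l : List Char) :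
    ∀ (idxs : List Int) (out ins : PySem.Set (List Char)) (br : Int),
      (∀ i ∈ idxs, 0 ≤ i ∧ i + 3 ≤ (l.length : Int)) →
      (∀ t ∈ out, ∃ x y, t = [x, y, x]) →
      (∀ t ∈ ins, ∃ x y, t = [x, y, x]) →
      (∀ t ∈ out, babOf t ∉ ins) →
      isSSL_loopA l idxs out ins br =
        crossB (collectD l idxs out ins br).1 (collectD l idxs out ins br).2 := by
  intro idxs
  induction idxs with
  | nil =>
    intro out ins br _ _ _ hcross
    simp only [isSSL_loopA, collectD]
    exact (crossB_false hcross).symm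
  | cons i rest ih =>
    intro out ins br hidx hout hins hcross
    obtain ⟨hi0, hi3⟩ := hidx i (by simp)
    have hrest : ∀ j ∈ rest, 0 ≤ j ∧ j + 3 ≤ (l.length : Int) :=
      fun j hj => hidx j (by simp [hj])
    simp only [isSSL_loopA, collectD]
    split_ifs with h1 h2 h3 h4 h5 h5
    · exact ih out ins (br + 1) hrest hout hins hcross
    · exact ih out ins (br - 1) hrest hout hins hcross
    · -- ABA, brackets ≠ 0, BAB already collected outside: A returns True
      have hshape := aba_shape hi0 hi3 h3
      rw [hshape] at h5 ⊢
      rw [show [PySem.List.pyGetD [l[i.toNat], l[i.toNat + 1], l[i.toNat]] 1 ' ',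
            PySem.List.pyGetD [l[i.toNat], l[i.toNat + 1], l[i.toNat]] 0 ' ',
            PySem.List.pyGetD [l[i.toNat], l[i.toNat + 1], l[i.toNat]] 1 ' ']
          = [l[i.toNat + 1], l[i.toNat], l[i.toNat + 1]] from babOf_pair _ _] at h5
      have hmo := (mem_collectD l _ rest out
        (PySem.Set.add ins [l[i.toNat], l[i.toNat + 1], l[i.toNat]]) br).1
        ((PySem.Set.contains_iff _ _).mp h5)
      have hmi := (mem_collectD l [l[i.toNat], l[i.toNat + 1], l[i.toNat]] rest out
        (PySem.Set.add ins [l[i.toNat], l[i.toNat + 1], l[i.toNat]]) br).2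
        ((PySem.Set.mem_add _ _ _).mpr (Or.inr rfl))
      exact (crossB_true hmo (by rwa [babOf_pair])).symm
    · -- ABA, brackets ≠ 0, no BAB outside yet: add the ABA inside and recurse
      have hshape := aba_shape hi0 hi3 h3
      rw [hshape] at h5 ⊢
      rw [show [PySem.List.pyGetD [l[i.toNat], l[i.toNat + 1], l[i.toNat]] 1 ' ',
            PySem.List.pyGetD [l[i.toNat], l[i.toNat + 1], l[i.toNat]] 0 ' ',
            PySem.List.pyGetD [l[i.toNat], l[i.toNat + 1], l[i.toNat]] 1 ' ']
          = [l[i.toNat + 1], l[i.toNat], l[i.toNat + 1]] from babOf_pair _ _] at h5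
      refine ih _ _ _ hrest hout ?_ ?_
      · intro t ht
        rcases (PySem.Set.mem_add _ _ _).mp ht with ht | ht
        · exact hins t ht
        · exact ⟨l[i.toNat], l[i.toNat + 1], ht⟩
      · intro t ht hmem
        rcases (PySem.Set.mem_add _ _ _).mp hmem with hm | hm
        · exact hcross t ht hm
        · obtain ⟨p, q, rfl⟩ := hout t ht
          rw [babOf_pair] at hm
          obtain ⟨e1, e2⟩ : q = l[i.toNat] ∧ p = l[i.toNat + 1] := by
            injection hm with a1 a2; injection a2 with a2 _; exact ⟨a1, a2⟩
          subst e1; subst e2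
          exact h5 ((PySem.Set.contains_iff _ _).mpr ht)
    · -- ABA, brackets = 0, BAB already collected inside: A returns True
      have hshape := aba_shape hi0 hi3 h3
      rw [hshape] at h5 ⊢
      rw [show [PySem.List.pyGetD [l[i.toNat], l[i.toNat + 1], l[i.toNat]] 1 ' ',
            PySem.List.pyGetD [l[i.toNat], l[i.toNat + 1], l[i.toNat]] 0 ' ',
            PySem.List.pyGetD [l[i.toNat], l[i.toNat + 1], l[i.toNat]] 1 ' ']
          = [l[i.toNat + 1], l[i.toNat], l[i.toNat + 1]] from babOf_pair _ _] at h5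
      have hmo := (mem_collectD l [l[i.toNat], l[i.toNat + 1], l[i.toNat]] rest
        (PySem.Set.add out [l[i.toNat], l[i.toNat + 1], l[i.toNat]]) ins br).1
        ((PySem.Set.mem_add _ _ _).mpr (Or.inr rfl))
      have hmi := (mem_collectD l _ rest
        (PySem.Set.add out [l[i.toNat], l[i.toNat + 1], l[i.toNat]]) ins br).2
        ((PySem.Set.contains_iff _ _).mp h5)
      exact (crossB_true hmo (by rwa [babOf_pair])).symm
    · -- ABA, brackets = 0, no BAB inside yet: add the ABA outside and recurse
      have hshape := aba_shape hi0 hi3 h3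
      rw [hshape] at h5 ⊢
      rw [show [PySem.List.pyGetD [l[i.toNat], l[i.toNat + 1], l[i.toNat]] 1 ' ',
            PySem.List.pyGetD [l[i.toNat], l[i.toNat + 1], l[i.toNat]] 0 ' ',
            PySem.List.pyGetD [l[i.toNat], l[i.toNat + 1], l[i.toNat]] 1 ' ']
          = [l[i.toNat + 1], l[i.toNat], l[i.toNat + 1]] from babOf_pair _ _] at h5
      refine ih _ _ _ hrest ?_ hins ?_
      · intro t ht
        rcases (PySem.Set.mem_add _ _ _).mp ht with ht | ht
        · exact hout t ht
        · exact ⟨l[i.toNat], l[i.toNat + 1], ht⟩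
      · intro t ht
        rcases (PySem.Set.mem_add _ _ _).mp ht with ht | ht
        · exact hcross t ht
        · subst ht
          rw [babOf_pair]
          intro hmem
          exact h5 ((PySem.Set.contains_iff _ _).mpr hmem)
    · exact ih out ins br hrest hout hins hcross

-- the balance fold shifts with its accumulator
theorem pureBal_shift (t : List Char) :
    ∀ d : Int,
      t.foldl (fun d c => d + (if c == '[' then 1 else 0) - (if c == ']' then 1 else 0)) d
        = d + pureBal t := by
  induction t with
  | nil => intro d; simp [pureBal]
  | cons c cs ih =>
    intro d
    simp only [pureBal, List.foldl_cons] at *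
    rw [ih, ih (0 + _ - _)]
    ring

theorem pureBal_cons (c : Char) (t : List Char) :
    pureBal (c :: t)
      = ((if c == '[' then (1:Int) else 0) - (if c == ']' then 1 else 0)) + pureBal t := by
  have h1 : pureBal (c :: t)
      = t.foldl (fun d c => d + (if c == '[' then 1 else 0) - (if c == ']' then 1 else 0))
          (0 + (if c == '[' then (1:Int) else 0) - (if c == ']' then 1 else 0)) := rfl
  rw [h1, pureBal_shift]
  ring

theorem balAux_get (l : List Char) :
    ∀ (d : Int) (k : Nat), k < l.length →
      (isSSL_balAux d l)[k]? = some (d + pureBal (l.take (k + 1))) := by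
  induction l with
  | nil => intro d k h; simp at h
  | cons c cs ih =>
    intro d k h
    cases k with
    | zero =>
      simp only [isSSL_balAux, List.getElem?_cons_zero, List.take_succ_cons, List.take_zero]
      rw [pureBal_cons]
      have : pureBal ([] : List Char) = 0 := rfl
      rw [this]
      congr 1
      ring
    | succ k =>
      simp only [isSSL_balAux, List.getElem?_cons_succ]
      rw [ih _ k (by simpa using h), List.take_succ_cons, pureBal_cons]
      congr 1
      ring

theorem length_balAux (l : List Char) : ∀ d : Int, (isSSL_balAux d l).length = l.length := by
  induction l with
  | nil => intro d; rfl
  | cons c cs ih => intro d; simp [isSSL_balAux, ih]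

theorem bal_get? (l : List Char) (k : Nat) (h : k ≤ l.length) :
    (isSSL_bal l)[k]? = some (pureBal (l.take k)) := by
  cases k with
  | zero => rfl
  | succ k =>
    simp only [isSSL_bal, List.getElem?_cons_succ]
    rw [balAux_get l 0 k (by omega)]
    congr 1
    ring

-- B's table at a valid index is the prefix balance A's counter holds there
theorem bal_getD (l : List Char) (j : Int) (h0 : 0 ≤ j) (hle : j ≤ (l.length : Int)) :
    PySem.List.pyGetD (isSSL_bal l) j 0 = pureBal (l.take j.toNat) := by
  have hlen : (isSSL_bal l).length = l.length + 1 := by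
    simp [isSSL_bal, length_balAux]
  rw [PySem.List.pyGetD_eq_getElem _ 0 h0 (by rw [hlen]; push_cast; omega)]
  have h2 := bal_get? l j.toNat (by omega)
  rw [List.getElem?_eq_getElem (by rw [hlen]; omega)] at h2
  exact Option.some_inj.mp h2

theorem pureBal_take_succ (l : List Char) (k : Nat) (h : k < l.length) :
    pureBal (l.take (k + 1)) = pureBal (l.take k)
      + ((if l[k] == '[' then (1:Int) else 0) - (if l[k] == ']' then 1 else 0)) := by
  rw [List.take_add_one, List.getElem?_eq_getElem h]
  simp only [Option.toList_some, pureBal, List.foldl_append, List.foldl_cons, List.foldl_nil]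
  ring

theorem alpha_not_bracket {a b c : Char} (h : PySem.Chars.strIsalpha [a, b, c] = true) :
    (a == '[') = false ∧ (a == ']') = false := by
  simp [PySem.Chars.strIsalpha] at h
  constructor <;> (simp only [beq_eq_false_iff_ne]; rintro rfl)
  · exact absurd h.1 (by decide)
  · exact absurd h.1 (by decide)

theorem getD_j (l : List Char) (j : Int) (h0 : 0 ≤ j) (h : j.toNat < l.length) :
    PySem.List.pyGetD l j ' ' = l[j.toNat] :=
  PySem.List.pyGetD_eq_getElem l ' ' h0 (by omega)

theorem getD_j1 (l : List Char) (j : Int) (h0 : 0 ≤ j) (h : j.toNat + 1 < l.length) :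
    PySem.List.pyGetD l (j + 1) ' ' = l[j.toNat + 1] := by
  rw [PySem.List.pyGetD_eq_getElem l ' ' (by omega) (by omega)]
  congr 1
  omega

theorem getD_j2 (l : List Char) (j : Int) (h0 : 0 ≤ j) (h : j.toNat + 2 < l.length) :
    PySem.List.pyGetD l (j + 2) ' ' = l[j.toNat + 2] := by
  rw [PySem.List.pyGetD_eq_getElem l ' ' (by omega) (by omega)]
  congr 1
  omega

-- B's inline triple test equals A's isABA at a valid index
theorem cond_eq (l : List Char) (j : Int) (h0 : 0 ≤ j) (h3 : j + 3 ≤ (l.length : Int)) :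
    (((l[j.toNat] == l[j.toNat + 2]) && !(l[j.toNat + 2] == l[j.toNat + 1]))
      && PySem.Chars.strIsalpha [l[j.toNat], l[j.toNat + 1], l[j.toNat + 2]])
      = isABA l j := by
  simp only [isABA, slice_triple h0 h3, getD_j l j h0 (by omega),
    getD_j1 l j h0 (by omega), getD_j2 l j h0 (by omega)]

-- L2: B's two passes equal the depth-carrying collection loop
theorem collect_eq_collectD (l : List Char) (m : Int) (hm : m + 2 ≤ (l.length : Int)) :
    ∀ (k : Nat) (j : Int), 0 ≤ j → (m - j).toNat = k →
      ∀ ins out,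
        isSSL_collect l (isSSL_bal l) (PySem.List.pyRange j m 1) ins out
          = ((collectD l (PySem.List.pyRange j m 1) out ins (pureBal (l.take j.toNat))).2,
             (collectD l (PySem.List.pyRange j m 1) out ins (pureBal (l.take j.toNat))).1) := by
  intro k
  induction k with
  | zero =>
    intro j hj hk ins out
    rw [PySem.List.pyRange_one_eq_nil (by omega)]
    rfl
  | succ k ih =>
    intro j hj hk ins out
    by_cases hjm0 : m ≤ j
    · rw [PySem.List.pyRange_one_eq_nil hjm0]; rfl
    have hjm : j < m := by omega
    rw [PySem.List.pyRange_one_cons hjm]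
    have h3 : j + 3 ≤ (l.length : Int) := by omega
    have hjn : j.toNat < l.length := by omega
    have hjn1 : (j + 1).toNat = j.toNat + 1 := by omega
    simp only [isSSL_collect, collectD]
    rw [getD_j l j hj hjn, getD_j1 l j hj (by omega), getD_j2 l j hj (by omega),
      slice_triple hj h3, bal_getD l j hj (by omega), cond_eq l j hj h3]
    by_cases haba : isABA l j = true
    · have halpha : PySem.Chars.strIsalpha [l[j.toNat], l[j.toNat + 1], l[j.toNat + 2]] = true := by
        have h' := haba
        simp only [isABA, Bool.and_eq_true] at h'
        rw [slice_triple hj h3] at h'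
        exact h'.2
      obtain ⟨hnl, hnr⟩ := alpha_not_bracket halpha
      rw [if_pos haba, if_pos haba]
      rw [if_neg (show ¬ ((l[j.toNat] == ']') = true) from by simp only [hnr]; exact Bool.false_ne_true)]
      rw [if_neg (show ¬ ((l[j.toNat] == '[') = true) from by simp only [hnl]; exact Bool.false_ne_true)]
      have hdep : pureBal (l.take (j + 1).toNat) = pureBal (l.take j.toNat) := by
        rw [hjn1, pureBal_take_succ l j.toNat hjn, hnl, hnr]
        norm_num
      by_cases hbr : pureBal (l.take j.toNat) ≠ 0
      · rw [if_pos hbr, if_pos hbr, ← hdep]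
        exact ih (j + 1) (by omega) (by omega) _ _
      · rw [if_neg hbr, if_neg hbr, ← hdep]
        exact ih (j + 1) (by omega) (by omega) _ _
    · rw [if_neg haba, if_neg haba]
      by_cases hbl : (l[j.toNat] == '[') = true
      · have hdep : pureBal (l.take (j + 1).toNat) = pureBal (l.take j.toNat) + 1 := by
          rw [hjn1, pureBal_take_succ l j.toNat hjn, hbl, eq_of_beq hbl]
          norm_num
          decide
        rw [if_pos hbl, ← hdep]
        exact ih (j + 1) (by omega) (by omega) _ _
      · have hbl' : (l[j.toNat] == '[') = false := by simpa using hbl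
        rw [if_neg hbl]
        by_cases hbr2 : (l[j.toNat] == ']') = true
        · have hdep : pureBal (l.take (j + 1).toNat) = pureBal (l.take j.toNat) - 1 := by
            rw [hjn1, pureBal_take_succ l j.toNat hjn, hbr2, hbl']
            norm_num
            ring
          rw [if_pos hbr2, ← hdep]
          exact ih (j + 1) (by omega) (by omega) _ _
        · have hbr2' : (l[j.toNat] == ']') = false := by simpa using hbr2
          have hdep : pureBal (l.take (j + 1).toNat) = pureBal (l.take j.toNat) := by
            rw [hjn1, pureBal_take_succ l j.toNat hjn, hbl', hbr2']
            norm_num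
          rw [if_neg hbr2, ← hdep]
          exact ih (j + 1) (by omega) (by omega) _ _

-- ===== VERDICT (by name: the statement is the Claim_ definition above) =====
theorem isSSL_spec : Claim_equal_isSSL := by
  intro s _
  show isSSL s = isSSL_alt s
  have hlen := PySem.Str.len_eq s
  have hm : ((s.toList.length : Int) - 2) + 2 ≤ (s.toList.length : Int) := by omega
  have hcoll := collect_eq_collectD s.toList ((s.toList.length : Int) - 2) hm
    (((s.toList.length : Int) - 2) - 0).toNat 0 le_rfl rfl PySem.Set.empty PySem.Set.empty
  have hL1 := loopA_eq_cross s.toList (PySem.List.pyRange 0 ((s.toList.length : Int) - 2) 1)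
    PySem.Set.empty PySem.Set.empty 0
    (fun i hi => by
      have h := PySem.List.mem_pyRange_one.mp hi
      exact ⟨h.1, by omega⟩)
    (by intro t ht; simp [PySem.Set.empty] at ht)
    (by intro t ht; simp [PySem.Set.empty] at ht)
    (by intro t ht; simp [PySem.Set.empty] at ht)
  have h0 : pureBal (List.take ((0:Int)).toNat s.toList) = 0 := rfl
  rw [h0] at hcoll
  simp only [isSSL, isSSL_alt]
  rw [hlen, hL1, hcoll]
  rfl
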